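-- pv_equiv track=rewrite | github.com/JayB202/code_practice | 백준/Silver/2512. 예산/예산.py | find_max_budget
-- ===== SOURCE A (Python) =====
-- def find_max_budget(requests, total_budget):
--     left, right = 0, max(requests)
--     answer = 0
--
--     while left <= right:
--         mid = (left + right) // 2
--         allocated = sum(min(request, mid) for request in requests)
--
--         if allocated <= total_budget:
--             answer = mid  # 가능한 최대 상한액을 업데이트
--             left = mid + 1
--         else:
--             right = mid - 1
--
--     return answer
-- ===== SOURCE B (Python) =====
-- def find_max_budget(requests, total_budget):
--     s = sorted(requests)
--     if sum(s) <= total_budget: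
--         return max(s[-1], 0)
--     cut = 0
--     prefix = 0
--     n = len(s)
--     for i in range(n):
--         cut = (total_budget - prefix) // (n - i)
--         if cut < s[i]:
--             break
--         prefix += s[i]
--     return max(cut, 0)
-- ===== Notes on version B (the rewrite author's own statement) =====
-- stated objective: faster
-- what changed: Replaces A's binary search on the answer (re-summing min(r, mid) over the whole list each probe) by a single sort + prefix-sum pass that computes the exact integer cutoff in closed form per sorted position.
-- outside the precondition, e.g. on find_max_budget([], 0): A raises ValueError, B raises IndexError
import Mathlib
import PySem

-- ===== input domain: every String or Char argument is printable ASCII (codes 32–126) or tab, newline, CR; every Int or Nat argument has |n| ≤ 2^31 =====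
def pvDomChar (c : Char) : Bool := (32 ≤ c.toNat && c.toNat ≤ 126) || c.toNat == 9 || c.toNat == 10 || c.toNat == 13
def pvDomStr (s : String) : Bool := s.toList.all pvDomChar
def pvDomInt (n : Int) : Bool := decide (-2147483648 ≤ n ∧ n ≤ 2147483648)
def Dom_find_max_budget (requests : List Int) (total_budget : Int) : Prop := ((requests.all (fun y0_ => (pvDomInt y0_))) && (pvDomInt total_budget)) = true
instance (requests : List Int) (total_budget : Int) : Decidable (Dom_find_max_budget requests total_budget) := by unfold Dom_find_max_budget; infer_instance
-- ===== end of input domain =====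

-- B replaces A's binary search on the answer by one sort + prefix-sum cutoff pass (alternative algorithm, same return value).

-- ===== PORT A =====
-- sum(min(request, mid) for request in requests)
def allocSum (requests : List Int) (mid : Int) : Int :=
  (requests.map (fun r => min r mid)).sum

-- the while-loop: state (left, right, answer)
def find_max_budget_loop (requests : List Int) (total_budget left right answer : Int) : Int :=
  if h : left ≤ right then
    let mid := PySem.Int.floordiv (left + right) 2
    if allocSum requests mid ≤ total_budget then
      find_max_budget_loop requests total_budget (mid + 1) right mid
    else
      find_max_budget_loop requests total_budget left (mid - 1) answer
  else answer
termination_by (right + 1 - left).toNat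
decreasing_by
  all_goals
    have hb := PySem.Int.floordiv_two_mid_bounds h
    omega

def find_max_budget (requests : List Int) (total_budget : Int) : Int :=
  -- max(requests): the ValueError on [] is excluded by Pre_; .getD 0 is never reached there
  let right := (PySem.List.max? requests (fun y => y)).getD 0
  find_max_budget_loop requests total_budget 0 right 0

-- ===== PORT B =====
-- the for-loop of Source B: remaining suffix of the sorted list, running prefix sum, current cut
def bCutLoop (total_budget : Int) : List Int → Int → Int → Int
  | [], _, cut => cut
  | v :: rest, pfx, _ =>
    let cut := PySem.Int.floordiv (total_budget - pfx) ((rest.length : Int) + 1)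
    if cut < v then cut else bCutLoop total_budget rest (pfx + v) cut

def find_max_budget_alt (requests : List Int) (total_budget : Int) : Int :=
  let s := PySem.List.sorted requests (fun y => y) false
  if s.sum ≤ total_budget then
    -- s[-1]: the IndexError on [] is excluded by Pre_; .getD 0 is never reached there
    max ((PySem.List.pyGet? s (-1)).getD 0) 0
  else
    max (bCutLoop total_budget s 0 0) 0

-- ===== PRECONDITION & SPEC =====
-- Python A raises ValueError (max of empty sequence) on requests = []; nothing else raises.
def Pre_find_max_budget (requests : List Int) (total_budget : Int) : Prop := requests ≠ []
instance (requests : List Int) (total_budget : Int) : Decidable (Pre_find_max_budget requests total_budget) := by unfold Pre_find_max_budget; infer_instance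
def pvWitness_find_max_budget : List Int × Int := ([3, 5], 4)

def Spec_find_max_budget (requests : List Int) (total_budget : Int) (out : Int) : Prop := out = find_max_budget_alt requests total_budget
instance (requests : List Int) (total_budget : Int) (out : Int) : Decidable (Spec_find_max_budget requests total_budget out) := by unfold Spec_find_max_budget; infer_instance

-- ===== CLAIM (what is proved, stated in full; the proofs are below) =====
def Claim_equal_find_max_budget : Prop := ∀ (requests : List Int) (total_budget : Int), Dom_find_max_budget requests total_budget → Pre_find_max_budget requests total_budget → Spec_find_max_budget requests total_budget (find_max_budget requests total_budget)

-- ===== LEMMAS AND PROOFS =====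

theorem allocSum_mono (t : List Int) {x y : Int} (h : x ≤ y) :
    allocSum t x ≤ allocSum t y := by
  induction t with
  | nil => simp [allocSum]
  | cons a t ih =>
    simp only [allocSum, List.map_cons, List.sum_cons] at ih ⊢
    exact add_le_add (min_le_min le_rfl h) ih

theorem allocSum_le_sum (t : List Int) (x : Int) : allocSum t x ≤ t.sum := by
  induction t with
  | nil => simp [allocSum]
  | cons a t ih =>
    simp only [allocSum, List.map_cons, List.sum_cons] at ih ⊢
    exact add_le_add (min_le_left a x) ih

theorem allocSum_eq_sum (t : List Int) (x : Int) (h : ∀ r ∈ t, r ≤ x) :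
    allocSum t x = t.sum := by
  induction t with
  | nil => rfl
  | cons a t ih =>
    simp only [allocSum, List.map_cons, List.sum_cons] at ih ⊢
    rw [min_eq_left (h a (by simp)), ih (fun r hr => h r (by simp [hr]))]

theorem allocSum_const (t : List Int) (x : Int) (h : ∀ r ∈ t, x ≤ r) :
    allocSum t x = x * (t.length : Int) := by
  induction t with
  | nil => simp [allocSum]
  | cons a t ih =>
    simp only [allocSum, List.map_cons, List.sum_cons, List.length_cons] at ih ⊢
    rw [min_eq_right (h a (by simp)), ih (fun r hr => h r (by simp [hr]))]
    push_cast; ring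

theorem allocSum_append (p s : List Int) (x : Int) :
    allocSum (p ++ s) x = allocSum p x + allocSum s x := by
  simp [allocSum]

theorem allocSum_perm {t₁ t₂ : List Int} (h : t₁.Perm t₂) (x : Int) :
    allocSum t₁ x = allocSum t₂ x :=
  (h.map (fun r => min r x)).sum_eq

theorem le_getLast_of_pairwise :
    ∀ (l : List Int), l.Pairwise (fun a b : Int => a ≤ b) → ∀ (a : Int), a ∈ l →
      ∀ (hne : l ≠ []), a ≤ l.getLast hne := by
  intro l
  induction l with
  | nil => intro _ a ha; exact absurd ha (by simp)
  | cons b t ih =>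
    intro h a ha hne
    obtain ⟨hb, ht⟩ := List.pairwise_cons.mp h
    by_cases htn : t = []
    · subst htn
      simp at ha
      simp [ha, List.getLast]
    · rw [List.getLast_cons htn]
      rcases List.mem_cons.mp ha with rfl | hat
      · exact hb _ (List.getLast_mem htn)
      · exact ih ht a hat htn

-- B's scan: its result v satisfies  allocSum t v ≤ B < allocSum t (v+1)  (t = the whole sorted list)
theorem bLoop_char (B : Int) :
    ∀ (s p : List Int) (pfx c0 : Int), s ≠ [] →
    (p ++ s).Pairwise (fun a b : Int => a ≤ b) → pfx = p.sum →
    (∀ r ∈ p, r * (s.length : Int) ≤ B - pfx) →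
    B < p.sum + s.sum →
    allocSum (p ++ s) (bCutLoop B s pfx c0) ≤ B ∧
    B < allocSum (p ++ s) (bCutLoop B s pfx c0 + 1) := by
  intro s
  induction s with
  | nil => intro p pfx c0 h; exact absurd rfl h
  | cons v rest ih =>
    intro p pfx c0 _ hsort hpfx hinv hgt
    have hk : (0 : Int) < (rest.length : Int) + 1 := by positivity
    rw [List.pairwise_append] at hsort
    obtain ⟨hp, hvr, hcross⟩ := hsort
    have hvrest : ∀ r ∈ rest, v ≤ r := (List.pairwise_cons.mp hvr).1
    simp only [bCutLoop]
    set cut := PySem.Int.floordiv (B - pfx) ((rest.length : Int) + 1) with hcutdef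
    have hcutk : cut * ((rest.length : Int) + 1) ≤ B - pfx :=
      (PySem.Int.le_floordiv_iff_mul_le hk).mp le_rfl
    have hcutk2 : B - pfx < (cut + 1) * ((rest.length : Int) + 1) :=
      (PySem.Int.floordiv_lt_iff_lt_mul hk).mp (by omega)
    by_cases hbr : cut < v
    · rw [if_pos hbr]
      have hle : ∀ r ∈ v :: rest, cut ≤ r := by
        intro r hr
        rcases List.mem_cons.mp hr with h | h
        · omega
        · have := hvrest r h; omega
      have hle1 : ∀ r ∈ v :: rest, cut + 1 ≤ r := by
        intro r hr
        rcases List.mem_cons.mp hr with h | h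
        · omega
        · have := hvrest r h; omega
      have hplen : ∀ r ∈ p, r ≤ cut + 1 := by
        intro r hr
        have h1 := hinv r hr
        have h2 : r ≤ cut := by
          rw [hcutdef]
          refine (PySem.Int.le_floordiv_iff_mul_le hk).mpr ?_
          have h2' : (((v :: rest).length : Int)) = (rest.length : Int) + 1 := by simp
          rw [h2'] at h1; exact h1
        omega
      constructor
      · rw [allocSum_append, allocSum_const (v :: rest) cut hle]
        have h1 := allocSum_le_sum p cut
        have h2 : ((v :: rest).length : Int) = (rest.length : Int) + 1 := by simp
        rw [h2]; omega
      · rw [allocSum_append, allocSum_const (v :: rest) (cut + 1) hle1,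
          allocSum_eq_sum p (cut + 1) hplen]
        have h2 : ((v :: rest).length : Int) = (rest.length : Int) + 1 := by simp
        rw [h2]; omega
    · rw [if_neg hbr]
      have hbr2 : v ≤ cut := by omega
      have hvk : v * ((rest.length : Int) + 1) ≤ B - pfx :=
        (PySem.Int.le_floordiv_iff_mul_le hk).mp (by rw [← hcutdef]; exact hbr2)
      have hrestne : rest ≠ [] := by
        intro h
        subst h
        simp at hvk hgt
        omega
      have hre : p ++ v :: rest = (p ++ [v]) ++ rest := by simp
      rw [hre]
      apply ih (p ++ [v]) (pfx + v) cut hrestne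
      · rw [← hre]; rw [List.pairwise_append]
        exact ⟨hp, hvr, hcross⟩
      · simp [hpfx]
      · intro r hr
        rcases List.mem_append.mp hr with h | h
        · have hrv : r ≤ v := hcross r h v (by simp)
          have : r * (rest.length : Int) ≤ v * (rest.length : Int) :=
            mul_le_mul_of_nonneg_right hrv (by positivity)
          nlinarith
        · simp at h; subst h; nlinarith
      · simp at hgt ⊢; omega

-- A's binary search, characterised by an invariant
theorem aLoop_char (requests : List Int) (B K : Int) :
    ∀ (n : Nat) (l r ans : Int), (r + 1 - l).toNat = n → 0 ≤ l →
    r ≤ K → (allocSum requests ans ≤ B ∨ ans = 0) → 0 ≤ ans → (ans = 0 ∨ ans ≤ K) →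
    (∀ x, 0 ≤ x → x < l → allocSum requests x ≤ B → x ≤ ans) →
    (∀ x, r < x → x ≤ K → ¬ allocSum requests x ≤ B) →
    ((allocSum requests (find_max_budget_loop requests B l r ans) ≤ B ∨
        find_max_budget_loop requests B l r ans = 0) ∧
      0 ≤ find_max_budget_loop requests B l r ans ∧
      (find_max_budget_loop requests B l r ans = 0 ∨ find_max_budget_loop requests B l r ans ≤ K) ∧
      (∀ x, 0 ≤ x → x ≤ K → allocSum requests x ≤ B → x ≤ find_max_budget_loop requests B l r ans)) := by
  intro n
  induction n using Nat.strong_induction_on with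
  | _ n ih =>
    intro l r ans hn hl hrK hans hans0 hansK hmax hhigh
    rw [find_max_budget_loop.eq_def]
    by_cases hlr : l ≤ r
    · rw [dif_pos hlr]
      simp only []
      have hmid := PySem.Int.floordiv_two_mid_bounds hlr
      set mid := PySem.Int.floordiv (l + r) 2 with hmiddef
      by_cases hg : allocSum requests mid ≤ B
      · rw [if_pos hg]
        exact ih ((r + 1 - (mid + 1)).toNat) (by omega) (mid + 1) r mid rfl (by omega) hrK
          (Or.inl hg) (by omega) (Or.inr (by omega))
          (fun x _ hx hgx => by omega) hhigh
      · rw [if_neg hg]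
        exact ih ((mid - 1 + 1 - l).toNat) (by omega) l (mid - 1) ans rfl hl (by omega)
          hans hans0 hansK hmax
          (fun x hx hxK hgx => hg (le_trans (allocSum_mono requests (by omega : mid ≤ x)) hgx))
    · rw [dif_neg hlr]
      refine ⟨hans, hans0, hansK, fun x hx0 hxK hgx => ?_⟩
      by_cases hxl : x < l
      · exact hmax x hx0 hxl hgx
      · exact absurd hgx (hhigh x (by omega) hxK)

-- ===== VERDICT (by name: the statement is the Claim_ definition above) =====
theorem find_max_budget_spec : Claim_equal_find_max_budget := by
  intro requests B _ hpre
  unfold Spec_find_max_budget find_max_budget find_max_budget_alt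
  -- the maximum of requests
  obtain ⟨m, hm⟩ : ∃ m, PySem.List.max? requests (fun y => y) = some m := by
    rcases hq : PySem.List.max? requests (fun y => y) with _ | m
    · exact absurd ((PySem.List.max?_eq_none_iff _ _).mp hq) hpre
    · exact ⟨m, rfl⟩
  have hmmem : m ∈ requests := PySem.List.max?_mem hm
  have hmmax : ∀ y ∈ requests, y ≤ m := PySem.List.max?_isMax hm
  rw [hm]
  simp only [Option.getD_some]
  -- the sorted list
  set s := PySem.List.sorted requests (fun y => y) false with hsdef
  have hperm : s.Perm requests := PySem.List.sorted_perm requests (fun y => y) false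
  have hsum : s.sum = requests.sum := hperm.sum_eq
  have halloc : ∀ x, allocSum s x = allocSum requests x := fun x => allocSum_perm hperm x
  have hsort : s.Pairwise (fun a b : Int => a ≤ b) := PySem.List.sorted_pairwise requests (fun y => y)
  have hsne : s ≠ [] := by
    intro h
    exact hpre ((PySem.List.sorted_eq_nil_iff _ _ _).mp (hsdef ▸ h))
  -- the A-side characterisation with K = m
  obtain ⟨C1, C2, C3, C4⟩ := aLoop_char requests B m ((m + 1 - 0).toNat) 0 m 0 rfl le_rfl
    le_rfl (Or.inr rfl) le_rfl (Or.inl rfl)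
    (fun x hx0 hxl _ => by omega)
    (fun x hx hxK => by omega)
  set A := find_max_budget_loop requests B 0 m 0 with hAdef
  by_cases hs : s.sum ≤ B
  · -- budget covers everything: B returns max(max(requests), 0)
    rw [if_pos hs]
    rw [PySem.List.pyGet?_neg_one, List.getLast?_eq_some_getLast hsne]
    simp only [Option.getD_some]
    have hlast : s.getLast hsne = m := by
      apply le_antisymm
      · exact hmmax _ (hperm.mem_iff.mp (List.getLast_mem hsne))
      · exact le_getLast_of_pairwise s hsort m (hperm.mem_iff.mpr hmmem) hsne
    rw [hlast]
    have hgm : allocSum requests m ≤ B := by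
      rw [allocSum_eq_sum requests m hmmax, ← hsum]; exact hs
    by_cases hm0 : 0 ≤ m
    · have h1 : m ≤ A := C4 m hm0 le_rfl hgm
      rw [max_eq_left hm0]
      omega
    · rw [max_eq_right (by omega : m ≤ 0)]
      omega
  · -- budget does not cover everything: B returns max(cut, 0)
    rw [if_neg hs]
    obtain ⟨hgv, hgv1⟩ := bLoop_char B s [] 0 0 hsne (by simpa using hsort) rfl
      (by simp) (by simpa using not_le.mp hs)
    rw [List.nil_append] at hgv hgv1
    rw [halloc] at hgv hgv1
    set v := bCutLoop B s 0 0 with hvdef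
    have hnotg : ∀ x, v < x → ¬ allocSum requests x ≤ B := by
      intro x hx h
      exact absurd (le_trans (allocSum_mono requests (by omega : v + 1 ≤ x)) h) (by omega)
    have hmnotg : ¬ allocSum requests m ≤ B := by
      rw [allocSum_eq_sum requests m hmmax, ← hsum]; exact hs
    have hvm : v < m := by
      by_contra h
      exact hmnotg (le_trans (allocSum_mono requests (by omega : m ≤ v)) hgv)
    by_cases hv0 : 0 ≤ v
    · have h1 : v ≤ A := C4 v hv0 (by omega) hgv
      have h2 : A ≤ v := by
        rcases C1 with h | h
        · by_contra hc
          exact hnotg A (by omega) h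
        · omega
      rw [max_eq_left hv0]
      omega
    · rw [max_eq_right (by omega : v ≤ 0)]
      rcases C1 with h | h
      · exact absurd h (hnotg A (by omega))
      · omega
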